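-- pv_equiv track=rewrite | github.com/sodalone/paper-reading-skill | scripts/build_report.py | infer_role_from_path
-- ===== SOURCE A (Python) =====
-- FALLBACK_ROLE_ORDER = [
--     "overview",
--     "method_detail",
--     "main_experiment",
--     "stability_or_training",
--     "qualitative",
-- ]
--
-- def infer_role_from_path(path: str, index: int = 0) -> str:
--     lowered = path.lower()
--     if any(token in lowered for token in ("failure", "fail")):
--         return "failure_case"
--     if any(token in lowered for token in ("qualitative", "visual")):
--         return "qualitative"
--     if any(token in lowered for token in ("plot", "curve", "training", "loss", "stability")):
--         return "stability_or_training"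
--     if any(token in lowered for token in ("overview", "framework", "pipeline", "paradigm", "intro", "main_fig")):
--         return "overview"
--     if any(token in lowered for token in ("adapter", "architecture", "module", "method")):
--         return "method_detail"
--     if any(token in lowered for token in ("result", "benchmark", "surds", "navsim", "nudynamics")):
--         return "main_experiment"
--     if index < len(FALLBACK_ROLE_ORDER):
--         return FALLBACK_ROLE_ORDER[index]
--     return "main_experiment"
-- ===== SOURCE B (Python) =====
-- FALLBACK_ROLE_ORDER = [
--     "overview",
--     "method_detail",
--     "main_experiment",
--     "stability_or_training",
--     "qualitative",
-- ]
--
-- ROLE_BY_PRIORITY = [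
--     "failure_case",
--     "qualitative",
--     "stability_or_training",
--     "overview",
--     "method_detail",
--     "main_experiment",
-- ]
--
-- TOKEN_PRIORITY = {
--     token: prio
--     for prio, group in enumerate([
--         ("failure", "fail"),
--         ("qualitative", "visual"),
--         ("plot", "curve", "training", "loss", "stability"),
--         ("overview", "framework", "pipeline", "paradigm", "intro", "main_fig"),
--         ("adapter", "architecture", "module", "method"),
--         ("result", "benchmark", "surds", "navsim", "nudynamics"),
--     ])
--     for token in group
-- }
--
-- def infer_role_from_path(path: str, index: int = 0) -> str:
--     lowered = path.lower()
--     best = None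
--     for token, prio in TOKEN_PRIORITY.items():
--         if token in lowered and (best is None or prio < best):
--             best = prio
--     if best is not None:
--         return ROLE_BY_PRIORITY[best]
--     if index < len(FALLBACK_ROLE_ORDER):
--         return FALLBACK_ROLE_ORDER[index]
--     return "main_experiment"
-- ===== Notes on version B (the rewrite author's own statement) =====
-- stated objective: alternative
-- what changed: Replaces A's ordered chain of six any() branches with early return by a flat token->priority dictionary scanned in one pass with a running-minimum accumulator; the role of the minimal matching priority is returned, the fallback indexing is unchanged.
import Mathlib
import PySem

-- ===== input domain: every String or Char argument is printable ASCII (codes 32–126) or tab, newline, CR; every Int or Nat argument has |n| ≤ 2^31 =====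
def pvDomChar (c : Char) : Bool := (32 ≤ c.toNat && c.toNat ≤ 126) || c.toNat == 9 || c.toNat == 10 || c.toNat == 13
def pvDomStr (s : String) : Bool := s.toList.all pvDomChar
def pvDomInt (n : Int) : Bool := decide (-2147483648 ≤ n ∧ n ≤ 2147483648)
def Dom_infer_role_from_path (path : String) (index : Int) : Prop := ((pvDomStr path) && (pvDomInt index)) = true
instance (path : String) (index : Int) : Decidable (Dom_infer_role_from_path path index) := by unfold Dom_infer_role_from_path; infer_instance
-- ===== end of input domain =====

-- B replaces A's early-return chain of six any() branches by a flat token->priority map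
-- scanned in one pass with a running-minimum accumulator (alternative decomposition; same cost).


-- module constant FALLBACK_ROLE_ORDER (shared data of both sources)
def pvFallbackRoleOrder : List String :=
  ["overview", "method_detail", "main_experiment", "stability_or_training", "qualitative"]

-- ===== PORT A =====
def infer_role_from_path (path : String) (index : Int) : String :=
  let lowered := PySem.Str.lower path
  if ["failure", "fail"].any (fun t => PySem.Str.isIn t lowered) then "failure_case"
  else if ["qualitative", "visual"].any (fun t => PySem.Str.isIn t lowered) then "qualitative"
  else if ["plot", "curve", "training", "loss", "stability"].any (fun t => PySem.Str.isIn t lowered) then "stability_or_training"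
  else if ["overview", "framework", "pipeline", "paradigm", "intro", "main_fig"].any (fun t => PySem.Str.isIn t lowered) then "overview"
  else if ["adapter", "architecture", "module", "method"].any (fun t => PySem.Str.isIn t lowered) then "method_detail"
  else if ["result", "benchmark", "surds", "navsim", "nudynamics"].any (fun t => PySem.Str.isIn t lowered) then "main_experiment"
  else if index < (pvFallbackRoleOrder.length : Int) then
    -- Python indexing FALLBACK_ROLE_ORDER[index]; none (IndexError) is excluded by Pre_
    (PySem.List.pyGet? pvFallbackRoleOrder index).getD ""
  else "main_experiment"

-- ===== PORT B =====
def pvRoleByPriority : List String :=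
  ["failure_case", "qualitative", "stability_or_training", "overview", "method_detail", "main_experiment"]

def pvTokenGroups : List (List String) :=
  [["failure", "fail"],
   ["qualitative", "visual"],
   ["plot", "curve", "training", "loss", "stability"],
   ["overview", "framework", "pipeline", "paradigm", "intro", "main_fig"],
   ["adapter", "architecture", "module", "method"],
   ["result", "benchmark", "surds", "navsim", "nudynamics"]]

-- TOKEN_PRIORITY = {token: prio for prio, group in enumerate(...) for token in group}
-- (all tokens are distinct, so the dict's items are exactly this flat association list)
def pvTokenPriority : List (String × Int) :=
  (PySem.List.enumerate pvTokenGroups).flatMap (fun ig => ig.2.map (fun t => (t, ig.1)))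

-- one step of B's loop: 'if token in lowered and (best is None or prio < best): best = prio'
def pvStep (lowered : String) (best : Option Int) (tp : String × Int) : Option Int :=
  match best with
  | none => if PySem.Str.isIn tp.1 lowered then some tp.2 else none
  | some b => if PySem.Str.isIn tp.1 lowered ∧ tp.2 < b then some tp.2 else some b

def infer_role_from_path_alt (path : String) (index : Int) : String :=
  let lowered := PySem.Str.lower path
  let best := pvTokenPriority.foldl (pvStep lowered) none
  match best with
  | some b => (PySem.List.pyGet? pvRoleByPriority b).getD ""
  | none =>
    if index < (pvFallbackRoleOrder.length : Int) then
      (PySem.List.pyGet? pvFallbackRoleOrder index).getD ""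
    else "main_experiment"

-- ===== PRECONDITION & SPEC =====
-- Pre_ excludes exactly the inputs on which Python A raises IndexError:
-- no token occurs in the lowered path and index < -5 (FALLBACK_ROLE_ORDER[index] is out of range).
def pvAllTokens : List String :=
  ["failure", "fail", "qualitative", "visual", "plot", "curve", "training", "loss", "stability",
   "overview", "framework", "pipeline", "paradigm", "intro", "main_fig",
   "adapter", "architecture", "module", "method",
   "result", "benchmark", "surds", "navsim", "nudynamics"]

def Pre_infer_role_from_path (path : String) (index : Int) : Prop :=
  -5 ≤ index ∨ pvAllTokens.any (fun t => PySem.Str.isIn t (PySem.Str.lower path)) = true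
instance (path : String) (index : Int) : Decidable (Pre_infer_role_from_path path index) := by
  unfold Pre_infer_role_from_path; infer_instance

def pvWitness_infer_role_from_path : String × Int := ("figures/main_fig_overview.png", 0)

def Spec_infer_role_from_path (path : String) (index : Int) (out : String) : Prop := out = infer_role_from_path_alt path index
instance (path : String) (index : Int) (out : String) : Decidable (Spec_infer_role_from_path path index out) := by unfold Spec_infer_role_from_path; infer_instance

-- ===== CLAIM (what is proved, stated in full; the proofs are below) =====
def Claim_equal_infer_role_from_path : Prop := ∀ (path : String) (index : Int), Dom_infer_role_from_path path index → Pre_infer_role_from_path path index → Spec_infer_role_from_path path index (infer_role_from_path path index)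

-- ===== LEMMAS AND PROOFS =====

-- folding B's step over one rule group (all tokens carry the same priority p)
theorem pvFoldl_group (lowered : String) (p : Int) (acc : Option Int) (g : List String) :
    List.foldl (pvStep lowered) acc (g.map (fun t => (t, p))) =
      if g.any (fun t => PySem.Str.isIn t lowered) then
        (match acc with
         | none => some p
         | some b => if p < b then some p else some b)
      else acc := by
  induction g generalizing acc with
  | nil => simp
  | cons t g ih =>
    rw [List.map_cons, List.foldl_cons, List.any_cons, ih]
    cases ht : PySem.Str.isIn t lowered with
    | true =>
      cases acc with
      | none => simp only [pvStep, ht, if_pos trivial, Bool.true_or]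
                cases hg : g.any (fun t => PySem.Str.isIn t lowered) <;> simp
      | some b =>
        by_cases hp : p < b
        · simp only [pvStep, ht, true_and, if_pos hp, Bool.true_or]
          cases hg : g.any (fun t => PySem.Str.isIn t lowered) <;> simp
        · simp only [pvStep, ht, true_and, if_neg hp, Bool.true_or]
          cases hg : g.any (fun t => PySem.Str.isIn t lowered) <;> simp
    | false =>
      simp only [pvStep, ht, Bool.false_or]
      cases acc <;> simp

theorem pvTokenPriority_split :
    pvTokenPriority =
      (["failure", "fail"].map (fun t => (t, (0 : Int)))) ++
      (["qualitative", "visual"].map (fun t => (t, (1 : Int)))) ++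
      (["plot", "curve", "training", "loss", "stability"].map (fun t => (t, (2 : Int)))) ++
      (["overview", "framework", "pipeline", "paradigm", "intro", "main_fig"].map (fun t => (t, (3 : Int)))) ++
      (["adapter", "architecture", "module", "method"].map (fun t => (t, (4 : Int)))) ++
      (["result", "benchmark", "surds", "navsim", "nudynamics"].map (fun t => (t, (5 : Int)))) := by
  rfl

-- ===== VERDICT (by name: the statement is the Claim_ definition above) =====
theorem infer_role_from_path_spec : Claim_equal_infer_role_from_path := by
  intro path index _ _
  unfold Spec_infer_role_from_path infer_role_from_path infer_role_from_path_alt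
  simp only [pvTokenPriority_split, List.foldl_append, pvFoldl_group]
  cases _h1 : (["failure", "fail"].any (fun t => PySem.Str.isIn t (PySem.Str.lower path))) <;>
  cases _h2 : (["qualitative", "visual"].any (fun t => PySem.Str.isIn t (PySem.Str.lower path))) <;>
  cases _h3 : (["plot", "curve", "training", "loss", "stability"].any (fun t => PySem.Str.isIn t (PySem.Str.lower path))) <;>
  cases _h4 : (["overview", "framework", "pipeline", "paradigm", "intro", "main_fig"].any (fun t => PySem.Str.isIn t (PySem.Str.lower path))) <;>
  cases _h5 : (["adapter", "architecture", "module", "method"].any (fun t => PySem.Str.isIn t (PySem.Str.lower path))) <;>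
  cases _h6 : (["result", "benchmark", "surds", "navsim", "nudynamics"].any (fun t => PySem.Str.isIn t (PySem.Str.lower path))) <;>
  rfl
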